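-- pv_equiv track=rewrite | github.com/ribmarciojr/HorseRace | mutex.py | create_obstacles
-- ===== SOURCE A (Python) =====
-- def create_obstacles(mapa, non_obstacle_on_first=1):
--     row_quantities = len(mapa)
--
--     for i in range(row_quantities):
--         row_length = len(mapa[0])
--
--         if (i >= (row_quantities - non_obstacle_on_first)) or i == 0:
--             continue
--
--         for j in range(row_length):
--
--             if (i % 2) == 0 and (j % 2) != 0:
--                 mapa[i][j] = "0"
--
--             if (i % 2) != 0 and (j % 2) == 0:
--                 mapa[i][j] = "0"
--
--     return mapa
-- ===== SOURCE B (Python) =====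
-- def create_obstacles(mapa, non_obstacle_on_first=1):
--     # Mutates mapa in place like the original (rows are shared lists).
--     rows = len(mapa)
--     if rows:
--         row_length = len(mapa[0])
--         for i in range(1, rows):
--             if i >= rows - non_obstacle_on_first:
--                 continue
--             start = 1 if i % 2 == 0 else 0
--             count = (row_length - start + 1) // 2
--             mapa[i][start:row_length:2] = ["0"] * count
--     return mapa
-- ===== Notes on version B (the rewrite author's own statement) =====
-- stated objective: idiomatic
-- what changed: B replaces the inner scan over every column with its parity test by a single extended-slice assignment mapa[i][start:row_length:2] = ['0']*count that touches only the cells actually set (start derived from the row's parity), and skips row 0 by starting the row loop at 1.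
import Mathlib
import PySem

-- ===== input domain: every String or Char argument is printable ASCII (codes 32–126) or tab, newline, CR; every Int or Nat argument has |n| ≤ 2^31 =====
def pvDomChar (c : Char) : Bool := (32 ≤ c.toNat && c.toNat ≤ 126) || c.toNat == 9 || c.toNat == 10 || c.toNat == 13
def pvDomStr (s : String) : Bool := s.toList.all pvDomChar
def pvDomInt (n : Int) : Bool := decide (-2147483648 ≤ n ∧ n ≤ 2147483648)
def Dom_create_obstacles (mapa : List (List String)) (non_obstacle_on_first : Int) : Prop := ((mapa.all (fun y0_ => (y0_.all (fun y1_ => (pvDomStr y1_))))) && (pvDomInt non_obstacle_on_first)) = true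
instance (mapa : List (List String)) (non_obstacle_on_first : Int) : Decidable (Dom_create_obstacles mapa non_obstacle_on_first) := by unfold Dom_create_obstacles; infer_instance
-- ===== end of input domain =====

-- B replaces the inner per-column parity scan with one strided slice assignment per row
-- (row loop starts at 1); both Pythons mutate mapa in place, the equivalence proved is about the returned grid.


-- ===== PORT A =====
def create_obstacles (mapa : List (List String)) (non_obstacle_on_first : Int) : List (List String) :=
  let rows := mapa.length
  (List.range rows).foldl (fun (g : List (List String)) (i : Nat) =>
    let row_length := (g.headD []).length
    if ((i : Int) ≥ (rows : Int) - non_obstacle_on_first) ∨ i = 0 then g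
    else
      (List.range row_length).foldl (fun (g : List (List String)) (j : Nat) =>
        let g1 := if i % 2 = 0 ∧ j % 2 ≠ 0 then g.modify i (fun r => r.set j "0") else g
        if i % 2 ≠ 0 ∧ j % 2 = 0 then g1.modify i (fun r => r.set j "0") else g1) g) mapa

-- ===== PORT B =====
-- port of Python's extended-slice assignment row[start:stop:2] = ["0"]*count (exact under Pre_,
-- where every written index is in range)
def pvSliceAssign (r : List String) (start stop : Nat) : List String :=
  (List.range ((stop + 1 - start) / 2)).foldl (fun (r : List String) (k : Nat) => r.set (start + 2 * k) "0") r

def create_obstacles_alt (mapa : List (List String)) (non_obstacle_on_first : Int) : List (List String) :=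
  let rows := mapa.length
  if rows = 0 then mapa
  else
    let row_length := (mapa.headD []).length
    (List.range' 1 (rows - 1)).foldl (fun (g : List (List String)) (i : Nat) =>
      if (i : Int) ≥ (rows : Int) - non_obstacle_on_first then g
      else
        let start := if i % 2 = 0 then 1 else 0
        g.modify i (fun r => pvSliceAssign r start row_length)) mapa

-- ===== PRECONDITION & SPEC =====
-- Pre_ excludes exactly the ragged grids on which Python A raises IndexError: some processed row i
-- is too short at a cell of row i's parity pattern (B's slice assignment raises ValueError there too).
def Pre_create_obstacles (mapa : List (List String)) (non_obstacle_on_first : Int) : Prop :=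
  ∀ i < mapa.length, 1 ≤ i → (i : Int) < (mapa.length : Int) - non_obstacle_on_first →
    ∀ j < (mapa.headD []).length,
      ((i % 2 = 0 ∧ j % 2 = 1) ∨ (i % 2 = 1 ∧ j % 2 = 0)) → j < (mapa.getD i []).length
instance (mapa : List (List String)) (non_obstacle_on_first : Int) : Decidable (Pre_create_obstacles mapa non_obstacle_on_first) := by unfold Pre_create_obstacles; exact Nat.decidableBallLT _ _

def pvWitness_create_obstacles : List (List String) × Int := ([["a","b"],["c","d"],["e","f"]], 1)

def Spec_create_obstacles (mapa : List (List String)) (non_obstacle_on_first : Int) (out : List (List String)) : Prop := out = create_obstacles_alt mapa non_obstacle_on_first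
instance (mapa : List (List String)) (non_obstacle_on_first : Int) (out : List (List String)) : Decidable (Spec_create_obstacles mapa non_obstacle_on_first out) := by unfold Spec_create_obstacles; infer_instance

-- ===== CLAIM (what is proved, stated in full; the proofs are below) =====
def Claim_equal_create_obstacles : Prop := ∀ (mapa : List (List String)) (non_obstacle_on_first : Int), Dom_create_obstacles mapa non_obstacle_on_first → Pre_create_obstacles mapa non_obstacle_on_first → Spec_create_obstacles mapa non_obstacle_on_first (create_obstacles mapa non_obstacle_on_first)

-- ===== LEMMAS AND PROOFS =====

-- the row-level effect of A's inner column loop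
def pvRowA (i rl : Nat) (r : List String) : List String :=
  (List.range rl).foldl (fun (r : List String) (j : Nat) =>
    let r1 := if i % 2 = 0 ∧ j % 2 ≠ 0 then r.set j "0" else r
    if i % 2 ≠ 0 ∧ j % 2 = 0 then r1.set j "0" else r1) r

theorem pv_modify_id {α : Type} (g : List α) (i : Nat) : g.modify i (fun r => r) = g := by
  induction g generalizing i with
  | nil => simp
  | cons a t ih =>
    cases i with
    | zero => simp
    | succ k =>
      have := ih k
      simpa [List.modify_cons] using this

theorem pv_modify_modify {α : Type} (g : List α) (i : Nat) (f h : α → α) :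
    (g.modify i f).modify i h = g.modify i (fun r => h (f r)) := by
  induction g generalizing i with
  | nil => simp
  | cons a t ih =>
    cases i with
    | zero => simp
    | succ k => simpa [List.modify_cons] using ih k

theorem pv_headD_modify (g : List (List String)) (i : Nat) (f : List String → List String)
    (hi : 1 ≤ i) : (g.modify i f).headD [] = g.headD [] := by
  cases g with
  | nil => simp
  | cons a t =>
    cases i with
    | zero => omega
    | succ k => simp

theorem pv_rowA_succ (i n : Nat) :
    pvRowA i (n + 1) = fun r =>
      (let r1 := if i % 2 = 0 ∧ n % 2 ≠ 0 then (pvRowA i n r).set n "0" else pvRowA i n r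
       if i % 2 ≠ 0 ∧ n % 2 = 0 then r1.set n "0" else r1) := by
  funext r
  simp [pvRowA, List.range_succ]

-- A's inner loop is a single modify of row i
theorem pv_inner_eq (i rl : Nat) (g : List (List String)) :
    (List.range rl).foldl (fun (g : List (List String)) (j : Nat) =>
        let g1 := if i % 2 = 0 ∧ j % 2 ≠ 0 then g.modify i (fun r => r.set j "0") else g
        if i % 2 ≠ 0 ∧ j % 2 = 0 then g1.modify i (fun r => r.set j "0") else g1) g
      = g.modify i (pvRowA i rl) := by
  induction rl with
  | zero =>
    have h : pvRowA i 0 = fun r => r := by funext r; simp [pvRowA]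
    simp [h, pv_modify_id]
  | succ n ih =>
    rw [List.range_succ, List.foldl_append, ih, pv_rowA_succ]
    simp only [List.foldl_cons, List.foldl_nil]
    split_ifs with h1 h2
    · rcases h1 with ⟨a, b⟩; rcases h2 with ⟨c, d⟩; omega
    · rw [pv_modify_modify]
    · rw [pv_modify_modify]
    · rfl

-- the row-level effect equals the strided slice assignment
theorem pv_row_eq_slice (i rl : Nat) (r : List String) :
    pvRowA i rl r = pvSliceAssign r (if i % 2 = 0 then 1 else 0) rl := by
  induction rl with
  | zero =>
    rcases Nat.mod_two_eq_zero_or_one i with h | h <;>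
      simp [pvRowA, pvSliceAssign, h]
  | succ n ih =>
    rw [pv_rowA_succ]
    simp only []
    rw [ih]
    rcases Nat.mod_two_eq_zero_or_one i with hi | hi <;>
      rcases Nat.mod_two_eq_zero_or_one n with hn | hn <;>
      simp [pvSliceAssign, hi, hn]
    · -- i even, n even: no cell added
      have hc : (n + 1) / 2 = n / 2 := by omega
      rw [hc]
    · -- i even, n odd: new cell at n = 1 + 2*(n/2)
      have hc : (n + 1) / 2 = n / 2 + 1 := by omega
      have hidx : 1 + 2 * (n / 2) = n := by omega
      rw [hc, List.range_succ, List.foldl_append]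
      simp [hidx]
    · -- i odd, n even: new cell at n = 2*((n+1)/2)
      have hc : (n + 1 + 1) / 2 = (n + 1) / 2 + 1 := by omega
      have hidx : 2 * ((n + 1) / 2) = n := by omega
      rw [hc, List.range_succ, List.foldl_append]
      simp [hidx]
    · -- i odd, n odd: no cell added
      have hc : (n + 1 + 1) / 2 = (n + 1) / 2 := by omega
      rw [hc]

-- the two outer loops agree on any list of row indices that are all ≥ 1
theorem pv_loop_eq (rows : Nat) (n : Int) :
    ∀ (is : List Nat) (g : List (List String)), (∀ i ∈ is, 1 ≤ i) →
    is.foldl (fun (g : List (List String)) (i : Nat) =>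
        let row_length := (g.headD []).length
        if ((i : Int) ≥ (rows : Int) - n) ∨ i = 0 then g
        else
          (List.range row_length).foldl (fun (g : List (List String)) (j : Nat) =>
            let g1 := if i % 2 = 0 ∧ j % 2 ≠ 0 then g.modify i (fun r => r.set j "0") else g
            if i % 2 ≠ 0 ∧ j % 2 = 0 then g1.modify i (fun r => r.set j "0") else g1) g) g
    = is.foldl (fun (g' : List (List String)) (i : Nat) =>
        if (i : Int) ≥ (rows : Int) - n then g'
        else
          g'.modify i (fun r => pvSliceAssign r (if i % 2 = 0 then 1 else 0) ((g.headD []).length))) g := by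
  intro is
  induction is with
  | nil => intro g _; rfl
  | cons i t ih =>
    intro g hmem
    have hi : 1 ≤ i := hmem i (by simp)
    have ht : ∀ x ∈ t, 1 ≤ x := fun x hx => hmem x (by simp [hx])
    simp only [List.foldl_cons]
    by_cases hskip : (i : Int) ≥ (rows : Int) - n
    · rw [if_pos (Or.inl hskip), if_pos hskip]
      exact ih g ht
    · have hne : i ≠ 0 := by omega
      have hnor : ¬ (((i : Int) ≥ (rows : Int) - n) ∨ i = 0) := by
        rintro (h | h)
        · exact hskip h
        · exact hne h
      rw [if_neg hnor, if_neg hskip]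
      rw [pv_inner_eq]
      have hhead : ((g.modify i (pvRowA i ((g.headD []).length))).headD []) = g.headD [] :=
        pv_headD_modify g i _ hi
      rw [ih _ ht, hhead]
      congr 2
      funext r
      exact pv_row_eq_slice i ((g.headD []).length) r

-- ===== VERDICT (by name: the statement is the Claim_ definition above) =====
theorem create_obstacles_spec : Claim_equal_create_obstacles := by
  intro mapa n _ _
  unfold Spec_create_obstacles create_obstacles create_obstacles_alt
  cases mapa with
  | nil => rfl
  | cons r0 rest =>
    simp only [List.length_cons]
    rw [if_neg (Nat.succ_ne_zero rest.length)]
    have hrange : List.range (rest.length + 1) = 0 :: List.range' 1 rest.length := by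
      rw [List.range_eq_range', List.range'_succ]
    rw [hrange]
    simp only [List.foldl_cons]
    rw [if_pos (Or.inr trivial), Nat.add_sub_cancel]
    exact pv_loop_eq (rest.length + 1) n (List.range' 1 rest.length) (r0 :: rest)
      (fun i hi => (List.mem_range'_1.mp hi).1)
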